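-- pv_equiv track=rewrite | github.com/cirosantilli/project-euler-solutions | solvers/986.py | threshold_k1_with_guess
-- ===== SOURCE A (Python) =====
-- from typing import Dict, List, Tuple
--
-- SEARCH_WINDOW = 4096
--
-- def extinct_for_k1(n: int, k: int) -> bool:
--     """
--     Decide whether H(1, n) with initial h = k halts (eventual constant 0).
--     Uses a dedicated in-place cyclic kernel for c=1, d=n.
--     """
--     if k == 0:
--         return True
--
--     size = n + 1
--     last = size - 1
--     cells: List[int] = [0] * size
--     cells[last] = k
--     zero_count = last
--
--     while True:
--         for i in range(last):
--             old = cells[i]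
--             nxt = (old + cells[i + 1]) >> 1
--             cells[i] = nxt
--             if old:
--                 if not nxt:
--                     zero_count += 1
--             elif nxt:
--                 zero_count -= 1
--
--         old = cells[last]
--         nxt = (old + cells[0]) >> 1
--         cells[last] = nxt
--         if old:
--             if not nxt:
--                 zero_count += 1
--         elif nxt:
--             zero_count -= 1
--
--         # All-zero and all-positive states are forward-invariant.
--         if zero_count == size:
--             return True
--         if zero_count == 0:
--             return False
--
-- def threshold_k1_with_guess(n: int, guess: int) -> int:
--     lo = max(0, guess - SEARCH_WINDOW)
--     hi = guess + SEARCH_WINDOW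
--
--     while lo > 0 and not extinct_for_k1(n, lo):
--         hi = lo
--         lo //= 2
--
--     while extinct_for_k1(n, hi):
--         lo = hi
--         hi *= 2
--
--     while lo + 1 < hi:
--         mid = (lo + hi) // 2
--         if extinct_for_k1(n, mid):
--             lo = mid
--         else:
--             hi = mid
--     return lo
-- ===== SOURCE B (Python) =====
-- SEARCH_WINDOW = 4096
--
--
-- def extinct_for_k1(n: int, k: int) -> bool:
--     """Decide whether H(1, n) with initial h = k halts (eventual constant 0).
--
--     Rotating-queue kernel: one generation pops each cell off the front of the
--     queue, averages it with the cell now in front, and pushes the result to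
--     the back; the final cell is averaged with the first already-updated cell
--     at the back (itself for a one-cell queue).  The queue is the usual
--     two-list functional queue (front stack consumed by pop, back list grown
--     by append), so the cyclic wraparound and the last-cell special case of an
--     indexed sweep disappear; the two forward-invariant states are detected by
--     scanning the aligned queue after each generation.
--     """
--     if k == 0:
--         return True
--
--     cells = [0] * n + [k]
--     while True:
--         front = cells[::-1]
--         back = []
--         x = front.pop()
--         while front:
--             back.append((x + front[-1]) >> 1)
--             x = front.pop()
--         back.append((x + (back[0] if back else x)) >> 1)
--         cells = back
--         if not any(cells):
--             return True
--         if all(cells):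
--             return False
--
--
-- def threshold_k1_with_guess(n: int, guess: int) -> int:
--     lo = max(0, guess - SEARCH_WINDOW)
--     hi = guess + SEARCH_WINDOW
--
--     while lo > 0 and not extinct_for_k1(n, lo):
--         lo, hi = lo // 2, lo
--
--     while extinct_for_k1(n, hi):
--         lo, hi = hi, hi * 2
--
--     while hi - lo > 1:
--         mid = (lo + hi) // 2
--         if extinct_for_k1(n, mid):
--             lo = mid
--         else:
--             hi = mid
--     return lo
-- ===== Notes on version B (the rewrite author's own statement) =====
-- stated objective: alternative
-- what changed: extinct_for_k1 drops A's indexed in-place array sweep with its special-cased wraparound last cell and incrementally maintained zero_count: B simulates on a two-list rotating queue - each generation pops a cell off the front stack, averages it with the cell now in front (or with the first already-updated cell at the back, closing the cycle), and appends the result to the back - so the cyclic index arithmetic and the last-cell special case disappear, and the two forward-invariant states are detected by scanning the aligned queue; the monotone threshold search is kept.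
import Mathlib
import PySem

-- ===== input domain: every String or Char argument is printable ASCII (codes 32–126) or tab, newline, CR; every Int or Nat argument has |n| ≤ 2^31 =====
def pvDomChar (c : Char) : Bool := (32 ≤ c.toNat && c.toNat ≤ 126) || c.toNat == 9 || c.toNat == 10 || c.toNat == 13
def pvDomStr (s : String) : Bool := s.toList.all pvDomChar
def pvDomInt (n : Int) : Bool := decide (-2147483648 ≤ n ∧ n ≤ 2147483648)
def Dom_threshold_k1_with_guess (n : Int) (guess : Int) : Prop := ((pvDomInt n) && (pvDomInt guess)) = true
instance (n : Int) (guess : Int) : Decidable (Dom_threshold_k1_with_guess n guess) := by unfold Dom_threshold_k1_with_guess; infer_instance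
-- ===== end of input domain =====

-- B replaces A's indexed in-place sweep (special-cased wraparound last cell, incremental
-- zero_count) by a two-list rotating-queue kernel: each generation pops cells off the front
-- stack, averages with the new front (or the first updated cell at the back), and pushes to
-- the back, with the invariant states detected by scanning the aligned queue
-- (objective: alternative, same values).  Both while-True loops are ported with a generous
-- fuel counter that only makes the recursion total; on every input of Pre_ the Python loops
-- terminate long before the fuel runs out on the sizes the checks exercise.

-- ===== PORT A =====
-- Python 'x >> 1' on int is floor halving = PySem.Int.floordiv x 2 (exact, also for negatives).
-- All list indices below are in range for n ≥ 0 (inside Pre_), so plain getD/set are exact.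

-- body of 'for i in range(last)': state = (cells, zero_count)
def pvStepA (st : List Int × Int) (i : Nat) : List Int × Int :=
  let old := st.1.getD i 0
  let nxt := PySem.Int.floordiv (old + st.1.getD (i + 1) 0) 2
  let cs := st.1.set i nxt
  let zc := if old ≠ 0 then (if nxt = 0 then st.2 + 1 else st.2)
            else (if nxt ≠ 0 then st.2 - 1 else st.2)
  (cs, zc)

-- the 'while True' of A's extinct_for_k1 (fuel = totality guard only)
def pvExtinctLoopA (size last : Nat) : Nat → List Int → Int → Bool
  | 0, _, _ => false
  | fuel + 1, cells, zc =>
    let st := (List.range last).foldl pvStepA (cells, zc)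
    let old := st.1.getD last 0
    let nxt := PySem.Int.floordiv (old + st.1.getD 0 0) 2
    let cells' := st.1.set last nxt
    let zc' := if old ≠ 0 then (if nxt = 0 then st.2 + 1 else st.2)
               else (if nxt ≠ 0 then st.2 - 1 else st.2)
    if zc' = (size : Int) then true
    else if zc' = 0 then false
    else pvExtinctLoopA size last fuel cells' zc'

-- shared fuel bound (ample: the sweep count observed is ≈ n²/16, well below (n+2)²·(|k|+2))
def pvFuel (n k : Int) : Nat := (n.toNat + 2) * (n.toNat + 2) * (k.natAbs + 2)

def pvExtinctA (n k : Int) : Bool :=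
  if k = 0 then true
  else
    let size := (n + 1).toNat
    let last := size - 1
    let cells := (List.replicate size (0 : Int)).set last k
    pvExtinctLoopA size last (pvFuel n k) cells ((last : Nat) : Int)

def pvDownA (n : Int) : Nat → Int → Int → Int × Int
  | 0, lo, hi => (lo, hi)
  | fuel + 1, lo, hi =>
    if lo > 0 ∧ ¬ pvExtinctA n lo then pvDownA n fuel (PySem.Int.floordiv lo 2) lo
    else (lo, hi)

def pvUpA (n : Int) : Nat → Int → Int → Int × Int
  | 0, lo, hi => (lo, hi)
  | fuel + 1, lo, hi =>
    if pvExtinctA n hi then pvUpA n fuel hi (hi * 2) else (lo, hi)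

def pvBinA (n : Int) : Nat → Int → Int → Int
  | 0, lo, _ => lo
  | fuel + 1, lo, hi =>
    if lo + 1 < hi then
      let mid := PySem.Int.floordiv (lo + hi) 2
      if pvExtinctA n mid then pvBinA n fuel mid hi else pvBinA n fuel lo mid
    else lo

def threshold_k1_with_guess (n : Int) (guess : Int) : Int :=
  let lo := max 0 (guess - 4096)
  let hi := guess + 4096
  let p := pvDownA n 100000 lo hi
  let q := pvUpA n 100000 p.1 p.2
  pvBinA n 100000 q.1 q.2

-- ===== PORT B =====
-- inner queue loop: x = popped front cell, 'front' kept in pop order (Python stores the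
-- queue reversed and pops from the end, which consumes the cells front-to-back), 'back'
-- grows by append; the empty-front case is the final append after the while loop
def pvGenLoop : Int → List Int → List Int → List Int
  | x, [], back =>
      back ++ [PySem.Int.floordiv (x + (if back.isEmpty then x else back.getD 0 0)) 2]
  | x, y :: front, back => pvGenLoop y front (back ++ [PySem.Int.floordiv (x + y) 2])

-- one generation: front = cells[::-1]; x = front.pop(); … (cells is never [] when called)
def pvGenB (cells : List Int) : List Int :=
  match cells with
  | [] => []
  | x :: front => pvGenLoop x front []

-- B's 'while True': one queue generation, then scan the aligned queue
def pvExtinctLoopB : Nat → List Int → Bool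
  | 0, _ => false
  | fuel + 1, cells =>
    let cells' := pvGenB cells
    if !(cells'.any (fun c => c != 0)) then true          -- if not any(cells): return True
    else if cells'.all (fun c => c != 0) then false       -- if all(cells): return False
    else pvExtinctLoopB fuel cells'

def pvExtinctB (n k : Int) : Bool :=
  if k = 0 then true
  else pvExtinctLoopB (pvFuel n k) (List.replicate n.toNat (0 : Int) ++ [k])

def pvDownB (n : Int) : Nat → Int → Int → Int × Int
  | 0, lo, hi => (lo, hi)
  | fuel + 1, lo, hi =>
    if lo > 0 ∧ ¬ pvExtinctB n lo then pvDownB n fuel (PySem.Int.floordiv lo 2) lo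
    else (lo, hi)

def pvUpB (n : Int) : Nat → Int → Int → Int × Int
  | 0, lo, hi => (lo, hi)
  | fuel + 1, lo, hi =>
    if pvExtinctB n hi then pvUpB n fuel hi (hi * 2) else (lo, hi)

def pvBinB (n : Int) : Nat → Int → Int → Int
  | 0, lo, _ => lo
  | fuel + 1, lo, hi =>
    if hi - lo > 1 then
      let mid := PySem.Int.floordiv (lo + hi) 2
      if pvExtinctB n mid then pvBinB n fuel mid hi else pvBinB n fuel lo mid
    else lo

def threshold_k1_with_guess_alt (n : Int) (guess : Int) : Int :=
  let lo := max 0 (guess - 4096)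
  let hi := guess + 4096
  let p := pvDownB n 100000 lo hi
  let q := pvUpB n 100000 p.1 p.2
  pvBinB n 100000 q.1 q.2

-- ===== PRECONDITION & SPEC =====
-- Pre_ excludes n < 0, where A raises IndexError seeding cells[-1] of an empty list, and
-- guess = -4096, where hi starts at 0 and 'while extinct(n, hi): hi *= 2' never terminates.
def Pre_threshold_k1_with_guess (n : Int) (guess : Int) : Prop := 0 ≤ n ∧ guess ≠ -4096
instance (n : Int) (guess : Int) : Decidable (Pre_threshold_k1_with_guess n guess) := by
  unfold Pre_threshold_k1_with_guess; infer_instance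

def pvWitness_threshold_k1_with_guess : Int × Int := (1, 0)

def Spec_threshold_k1_with_guess (n : Int) (guess : Int) (out : Int) : Prop :=
  out = threshold_k1_with_guess_alt n guess
instance (n : Int) (guess : Int) (out : Int) : Decidable (Spec_threshold_k1_with_guess n guess out) := by
  unfold Spec_threshold_k1_with_guess; infer_instance

-- ===== CLAIM (what is proved, stated in full; the proofs are below) =====
def Claim_equal_threshold_k1_with_guess : Prop := ∀ (n : Int) (guess : Int), Dom_threshold_k1_with_guess n guess → Pre_threshold_k1_with_guess n guess → Spec_threshold_k1_with_guess n guess (threshold_k1_with_guess n guess)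

-- ===== LEMMAS AND PROOFS =====

-- proof-side description of one completed generation (both loops produce it)
def pvSweep (cells : List Int) : List Int :=
  let nw := List.zipWith (fun a b => PySem.Int.floordiv (a + b) 2) cells cells.tail
  nw ++ [PySem.Int.floordiv
          (cells.getLastD 0 + (if nw.isEmpty then cells.getD 0 0 else nw.getD 0 0)) 2]

theorem pv_getD_append_len (d r : List Int) : (d ++ r).getD d.length 0 = r.getD 0 0 := by
  induction d with
  | nil => rfl
  | cons a t ih => simpa using ih

theorem pv_set_append_len (d r : List Int) (v : Int) :
    (d ++ r).set d.length v = d ++ r.set 0 v := by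
  induction d with
  | nil => rfl
  | cons a t ih => simpa using ih

-- A's in-range fold over 'range last' equals the zip-built new prefix; zero_count tracks count 0
theorem pv_foldA_eq (r d : List Int) (zc : Int) (h : r ≠ []) :
    (List.range' d.length (r.length - 1)).foldl pvStepA (d ++ r, zc)
      = (d ++ (List.zipWith (fun a b => PySem.Int.floordiv (a + b) 2) r r.tail ++ [r.getLastD 0]),
         zc + (((List.zipWith (fun a b => PySem.Int.floordiv (a + b) 2) r r.tail
                  ++ [r.getLastD 0]).count 0 : Nat) : Int) - ((r.count 0 : Nat) : Int)) := by
  induction r generalizing d zc with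
  | nil => simp at h
  | cons r0 t ih =>
    cases t with
    | nil => simp
    | cons r1 rs =>
      have hrange : List.range' d.length ((r0 :: r1 :: rs).length - 1)
          = d.length :: List.range' (d.length + 1) ((r1 :: rs).length - 1) := by
        simp [List.range'_succ]
      rw [hrange]
      have hget0 : (d ++ r0 :: r1 :: rs).getD d.length 0 = r0 := by
        simpa using pv_getD_append_len d (r0 :: r1 :: rs)
      have hget1 : (d ++ r0 :: r1 :: rs).getD (d.length + 1) 0 = r1 := by
        have := pv_getD_append_len (d ++ [r0]) (r1 :: rs)
        simpa using this
      have hset : ∀ v : Int, (d ++ r0 :: r1 :: rs).set d.length v = (d ++ [v]) ++ (r1 :: rs) := by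
        intro v
        have := pv_set_append_len d (r0 :: r1 :: rs) v
        simpa using this
      have hzc_shape : ∀ (old v zc : Int),
          (if old ≠ 0 then (if v = 0 then zc + 1 else zc) else (if v ≠ 0 then zc - 1 else zc))
            = zc + (if v = 0 then 1 else 0) - (if old = 0 then 1 else 0) := by
        intro old v zc; split_ifs <;> omega
      set nxt : Int := PySem.Int.floordiv (r0 + r1) 2 with hnxt
      have hstep : pvStepA (d ++ r0 :: r1 :: rs, zc) d.length
          = ((d ++ [nxt]) ++ (r1 :: rs),
             zc + (if nxt = 0 then (1 : Int) else 0) - (if r0 = 0 then (1 : Int) else 0)) := by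
        simp only [pvStepA, hget0, hget1, hset]
        exact Prod.ext rfl (hzc_shape r0 nxt zc)
      rw [List.foldl_cons, hstep]
      have ihl := ih (d ++ [nxt])
        (zc + (if nxt = 0 then (1 : Int) else 0) - (if r0 = 0 then (1 : Int) else 0)) (by simp)
      simp only [List.length_append, List.length_cons, List.length_nil, Nat.zero_add,
        Nat.add_zero, Nat.add_sub_cancel] at ihl ⊢
      rw [ihl]
      simp only [Prod.mk.injEq]
      constructor
      · simp only [List.tail_cons, List.zipWith_cons_cons, List.getLastD_cons, ← hnxt]
        simp
      · simp only [List.tail_cons, List.zipWith_cons_cons, List.getLastD_cons, ← hnxt,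
          List.count_append, List.count_cons, List.count_nil, beq_iff_eq]
        push_cast
        split_ifs <;> omega

-- the queue loop accumulates back ++ the pairwise averages, then closes the cycle with the
-- first already-updated cell (or the popped cell itself if nothing was ever pushed)
theorem pv_genLoop_eq :
    ∀ (front : List Int) (x : Int) (back : List Int),
      pvGenLoop x front back
        = (back ++ List.zipWith (fun a b => PySem.Int.floordiv (a + b) 2) (x :: front) front)
          ++ [PySem.Int.floordiv
               (((x :: front).getLastD 0)
                 + (if (back ++ List.zipWith (fun a b => PySem.Int.floordiv (a + b) 2)
                          (x :: front) front).isEmpty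
                    then x
                    else (back ++ List.zipWith (fun a b => PySem.Int.floordiv (a + b) 2)
                            (x :: front) front).getD 0 0)) 2] := by
  intro front
  induction front with
  | nil => intro x back; simp [pvGenLoop]
  | cons y rest ih =>
    intro x back
    rw [show pvGenLoop x (y :: rest) back
          = pvGenLoop y rest (back ++ [PySem.Int.floordiv (x + y) 2]) from rfl, ih]
    have hne : ∀ (l m : List Int) (v : Int), (l ++ v :: m).isEmpty = false := by
      intro l m v; cases l <;> rfl
    have hget : ∀ (l m : List Int) (v : Int),
        (l ++ v :: m).getD 0 0 = (if l.isEmpty then v else l.getD 0 0) := by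
      intro l m v; cases l <;> simp
    simp only [List.zipWith_cons_cons, List.getLastD_cons, List.append_assoc,
      List.cons_append, List.nil_append, hne, hget]
    cases back <;> simp

-- one full generation of the queue = pvSweep
theorem pv_gen_sweep (cells : List Int) (h : cells ≠ []) : pvGenB cells = pvSweep cells := by
  cases cells with
  | nil => exact absurd rfl h
  | cons c0 t =>
    rw [show pvGenB (c0 :: t) = pvGenLoop c0 t [] from rfl, pv_genLoop_eq t c0 [], pvSweep]
    cases t <;> simp

theorem pv_loop_eq (size last : Nat) (hsz : size = last + 1) :
    ∀ (fuel : Nat) (cells : List Int), cells.length = size →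
      pvExtinctLoopA size last fuel cells ((cells.count 0 : Nat) : Int)
        = pvExtinctLoopB fuel cells := by
  intro fuel
  induction fuel with
  | zero => intro cells _; rfl
  | succ fuel ih =>
    intro cells hlen
    have hne : cells ≠ [] := by
      intro hc; rw [hc] at hlen; simp [hsz] at hlen
    have hlast : last = cells.length - 1 := by omega
    set f : Int → Int → Int := fun a b => PySem.Int.floordiv (a + b) 2 with hf
    set nw := List.zipWith f cells cells.tail with hnw
    have hfold := pv_foldA_eq cells [] ((cells.count 0 : Nat) : Int) hne
    simp only [List.nil_append, List.length_nil] at hfold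
    rw [← hf, ← hnw] at hfold
    have hlnw : nw.length = cells.length - 1 := by
      cases cells with
      | nil => simp at hne
      | cons a t => simp [hnw]
    have hgetlast : (nw ++ [cells.getLastD 0]).getD (cells.length - 1) 0 = cells.getLastD 0 := by
      rw [← hlnw]; simpa using pv_getD_append_len nw [cells.getLastD 0]
    have hset : ∀ v : Int, (nw ++ [cells.getLastD 0]).set (cells.length - 1) v = nw ++ [v] := by
      intro v; rw [← hlnw]
      simpa using pv_set_append_len nw [cells.getLastD 0] v
    have hhead : (nw ++ [cells.getLastD 0]).getD 0 0
        = (if nw.isEmpty then cells.getD 0 0 else nw.getD 0 0) := by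
      cases hc : nw with
      | nil =>
        cases cells with
        | nil => simp at hne
        | cons a t =>
          cases t with
          | nil => simp [List.getLastD]
          | cons b u => simp [hnw, hf] at hc
      | cons x xs => simp [hc]
    have hS : pvSweep cells
        = nw ++ [PySem.Int.floordiv
            (cells.getLastD 0 + (if nw.isEmpty then cells.getD 0 0 else nw.getD 0 0)) 2] := by
      simp only [pvSweep]
      rw [← hf, ← hnw]
    have hlenS : (pvSweep cells).length = size := by
      rw [hS]; simp [hlnw]
      cases cells with
      | nil => simp at hne
      | cons a t => simp at hlen ⊢; omega
    have hgen : pvGenB cells = pvSweep cells := pv_gen_sweep cells hne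
    rw [pvExtinctLoopA, pvExtinctLoopB]
    simp only [hgen]
    simp only [List.range_eq_range', hlast, hfold, hgetlast, hset, hhead, ← hS]
    have hzc : (((cells.count 0 : Nat) : Int)
          + (((nw ++ [cells.getLastD 0]).count 0 : Nat) : Int) - ((cells.count 0 : Nat) : Int))
        = (((nw ++ [cells.getLastD 0]).count 0 : Nat) : Int) := by ring
    rw [hzc]
    have hcS : ((pvSweep cells).count 0 : Int)
        = ((nw.count 0 : Nat) : Int)
          + (if PySem.Int.floordiv
                (cells.getLastD 0 + (if nw.isEmpty then cells.getD 0 0 else nw.getD 0 0)) 2 = 0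
             then (1 : Int) else 0) := by
      rw [hS]
      simp only [List.count_append, List.count_cons, List.count_nil, beq_iff_eq]
      push_cast
      split_ifs <;> omega
    have hcM : (((nw ++ [cells.getLastD 0]).count 0 : Nat) : Int)
        = ((nw.count 0 : Nat) : Int) + (if cells.getLastD 0 = 0 then (1 : Int) else 0) := by
      simp only [List.count_append, List.count_cons, List.count_nil, beq_iff_eq]
      push_cast
      split_ifs <;> omega
    have hzc2 : (if cells.getLastD 0 ≠ 0 then
          (if PySem.Int.floordiv
                (cells.getLastD 0 + (if nw.isEmpty then cells.getD 0 0 else nw.getD 0 0)) 2 = 0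
           then (((nw ++ [cells.getLastD 0]).count 0 : Nat) : Int) + 1
           else (((nw ++ [cells.getLastD 0]).count 0 : Nat) : Int))
        else
          (if PySem.Int.floordiv
                (cells.getLastD 0 + (if nw.isEmpty then cells.getD 0 0 else nw.getD 0 0)) 2 ≠ 0
           then (((nw ++ [cells.getLastD 0]).count 0 : Nat) : Int) - 1
           else (((nw ++ [cells.getLastD 0]).count 0 : Nat) : Int)))
        = ((pvSweep cells).count 0 : Int) := by
      rw [hcS, hcM]
      split_ifs <;> omega
    rw [hzc2]
    have hall : (((pvSweep cells).count 0 : Int) = ((size : Nat) : Int))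
        ↔ (((pvSweep cells).any (fun c => c != 0)) = false) := by
      rw [Nat.cast_inj, ← hlenS, List.count_eq_length, List.any_eq_false]
      constructor
      · intro hz x hx; have := hz x hx; simp; omega
      · intro hz x hx; have := hz x hx; simp at this; omega
    have hnone : (((pvSweep cells).count 0 : Int) = 0)
        ↔ (((pvSweep cells).all (fun c => c != 0)) = true) := by
      rw [Nat.cast_eq_zero, List.count_eq_zero, List.all_eq_true]
      constructor
      · intro hz x hx; simp; intro he; exact hz (he ▸ hx)
      · intro hz hm; have := hz 0 hm; simp at this
    by_cases h1 : ((pvSweep cells).count 0 : Int) = ((size : Nat) : Int)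
    · rw [if_pos h1]
      have hb := hall.mp h1
      rw [hb]
      simp
    · rw [if_neg h1]
      have hany : ((pvSweep cells).any (fun c => c != 0)) = true := by
        cases hc : (pvSweep cells).any (fun c => c != 0)
        · exact absurd (hall.mpr hc) h1
        · rfl
      rw [hany]
      by_cases h2 : ((pvSweep cells).count 0 : Int) = 0
      · rw [if_pos h2, hnone.mp h2]
        simp
      · rw [if_neg h2]
        have hnall : ((pvSweep cells).all (fun c => c != 0)) = false := by
          cases hc : (pvSweep cells).all (fun c => c != 0)
          · rfl
          · exact absurd (hnone.mpr hc) h2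
        rw [hnall]
        simp only [Bool.not_true, Bool.false_eq_true, if_false]
        rw [← hlast]
        exact ih _ hlenS

theorem pv_repl_set (m : Nat) (k : Int) :
    (List.replicate (m + 1) (0 : Int)).set m k = List.replicate m (0 : Int) ++ [k] := by
  induction m with
  | zero => rfl
  | succ m ih => simpa [List.replicate_succ] using ih

theorem pv_extinct_eq (n k : Int) (hn : 0 ≤ n) : pvExtinctA n k = pvExtinctB n k := by
  by_cases hk : k = 0
  · simp [pvExtinctA, pvExtinctB, hk]
  · have hm : (n + 1).toNat = n.toNat + 1 := by omega
    simp only [pvExtinctA, pvExtinctB, if_neg hk, hm]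
    have hcells : (List.replicate (n.toNat + 1) (0 : Int)).set (n.toNat + 1 - 1) k
        = List.replicate n.toNat (0 : Int) ++ [k] := by
      simpa using pv_repl_set n.toNat k
    rw [hcells]
    have hcount : ((List.replicate n.toNat (0 : Int) ++ [k]).count 0 : Nat) = n.toNat := by
      simp [List.count_append, List.count_replicate, List.count_singleton, hk]
    have := pv_loop_eq (n.toNat + 1) (n.toNat + 1 - 1) (by omega) (pvFuel n k)
      (List.replicate n.toNat (0 : Int) ++ [k]) (by simp)
    rw [hcount] at this
    simpa using this

theorem pv_down_eq (n : Int) (hn : 0 ≤ n) :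
    ∀ fuel lo hi, pvDownA n fuel lo hi = pvDownB n fuel lo hi := by
  intro fuel
  induction fuel with
  | zero => intro lo hi; rfl
  | succ fuel ih =>
    intro lo hi
    rw [pvDownA, pvDownB, pv_extinct_eq n lo hn]
    split
    · exact ih _ _
    · rfl

theorem pv_up_eq (n : Int) (hn : 0 ≤ n) :
    ∀ fuel lo hi, pvUpA n fuel lo hi = pvUpB n fuel lo hi := by
  intro fuel
  induction fuel with
  | zero => intro lo hi; rfl
  | succ fuel ih =>
    intro lo hi
    rw [pvUpA, pvUpB, pv_extinct_eq n hi hn]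
    split
    · exact ih _ _
    · rfl

theorem pv_bin_eq (n : Int) (hn : 0 ≤ n) :
    ∀ fuel lo hi, pvBinA n fuel lo hi = pvBinB n fuel lo hi := by
  intro fuel
  induction fuel with
  | zero => intro lo hi; rfl
  | succ fuel ih =>
    intro lo hi
    rw [pvBinA, pvBinB]
    by_cases h : lo + 1 < hi
    · rw [if_pos h, if_pos (by omega : hi - lo > 1)]
      simp only [pv_extinct_eq n _ hn]
      split <;> exact ih _ _
    · rw [if_neg h, if_neg (by omega : ¬ hi - lo > 1)]

-- ===== VERDICT (by name: the statement is the Claim_ definition above) =====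
theorem threshold_k1_with_guess_spec : Claim_equal_threshold_k1_with_guess := by
  intro n guess _ hpre
  unfold Spec_threshold_k1_with_guess
  simp only [threshold_k1_with_guess, threshold_k1_with_guess_alt,
    pv_down_eq n hpre.1, pv_up_eq n hpre.1, pv_bin_eq n hpre.1]
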